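-- pv_equiv track=rewrite | github.com/Tesloxi/idp | src/mqt/qecc/circuit_synthesis/cat_states.py | _degree_sets_exact
-- ===== SOURCE A (Python) =====
-- from functools import cache
--
-- def _degree_sets_exact(gens: list[int], t: int) -> list[set[int]]:
--     @cache
--     def _degree_sets_exact_cached(gens_key: tuple[int, ...], t: int) -> list[set[int]]:
--         gens = list(gens_key)
--         fault_sets: list[set[int]] = [set() for _ in range(t + 1)]
--         fault_sets[0].add(0)
--         for g in gens:
--             for h in range(t, 0, -1):
--                 for s in list(fault_sets[h - 1]):
--                     fault_sets[h].add(s ^ g)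
--         return fault_sets
--
--     key = tuple(sorted(set(gens)))
--     return _degree_sets_exact_cached(key, t)
-- ===== SOURCE B (Python) =====
-- from functools import cache
--
--
-- def _degree_sets_exact(gens: list[int], t: int) -> list[set[int]]:
--     unique = tuple(sorted(set(gens)))
--
--     @cache
--     def xors(n: int, h: int) -> tuple[int, ...]:
--         # distinct XOR values of the h-element subsets of unique[:n],
--         # in first-occurrence order of the colex subset enumeration
--         if h == 0:
--             return (0,)
--         if n == 0:
--             return ()
--         g = unique[n - 1]
--         return tuple(dict.fromkeys(xors(n - 1, h) + tuple(x ^ g for x in xors(n - 1, h - 1))))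
--
--     return [set(xors(len(unique), h)) for h in range(t + 1)]
-- ===== Notes on version B (the rewrite author's own statement) =====
-- stated objective: alternative
-- what changed: Replaces A's in-place triple-loop DP (mutating one list of sets per generator and level) with a memoized recursion xors(n,h) that builds, per degree h, the deduplicated list of XORs of the exactly-h-element subsets of the deduplicated generators.
import Mathlib
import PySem

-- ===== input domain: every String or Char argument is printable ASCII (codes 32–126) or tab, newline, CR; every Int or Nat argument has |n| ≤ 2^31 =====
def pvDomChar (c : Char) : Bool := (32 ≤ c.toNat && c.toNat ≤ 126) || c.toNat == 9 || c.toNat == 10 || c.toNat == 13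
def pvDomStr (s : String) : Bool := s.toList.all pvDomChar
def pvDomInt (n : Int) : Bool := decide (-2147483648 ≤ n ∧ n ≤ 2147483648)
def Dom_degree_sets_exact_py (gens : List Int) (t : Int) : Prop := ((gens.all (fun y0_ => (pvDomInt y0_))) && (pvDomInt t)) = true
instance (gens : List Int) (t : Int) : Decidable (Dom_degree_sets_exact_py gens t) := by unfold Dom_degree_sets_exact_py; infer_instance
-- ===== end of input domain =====

-- B replaces A's in-place triple-loop DP over a mutable list of sets with a memoized
-- recursion enumerating, per degree h, the XORs of all exactly-h-element subsets
-- (objective: alternative; same results, similar cost).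


-- ===== PORT A =====
-- body of 'for g in gens: for h in range(t, 0, -1): for s in list(fault_sets[h-1]): fault_sets[h].add(s ^ g)'
-- (indices h and h-1 are in range for h ∈ [1, t]; the inner 'for s' reads the snapshot of
-- fault_sets[h-1], which is unchanged at that point since h descends)
def pyAInner (t : Int) (fs : List (List Int)) (g : Int) : List (List Int) :=
  (PySem.List.pyRange t 0 (-1)).foldl (fun fs h =>
    let prev : PySem.Set Int := PySem.List.pyGetD fs (h - 1) []
    let cur : PySem.Set Int := PySem.List.pyGetD fs h []
    PySem.List.pySetD fs h (prev.foldl (fun c s => PySem.Set.add c (PySem.Int.bxor s g)) cur)) fs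

def degree_sets_exact_py (gens : List Int) (t : Int) : List (List Int) :=
  -- key = tuple(sorted(set(gens)))  (the @cache wrapper has no observable effect)
  let key := PySem.List.sorted (PySem.Set.ofList gens) (fun x => x) false
  -- fault_sets = [set() for _ in range(t+1)]
  let fault_sets : List (List Int) := (PySem.List.pyRange 0 (t + 1) 1).map (fun _ => ([] : List Int))
  -- fault_sets[0].add(0)  (IndexError when t < 0: excluded by Pre_; pyGetD/pySetD then leave [] unchanged)
  let fault_sets := PySem.List.pySetD fault_sets 0 (PySem.Set.add (PySem.List.pyGetD fault_sets 0 []) (0 : Int))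
  key.foldl (pyAInner t) fault_sets

-- ===== PORT B =====
-- B's xors(n, h) recurses on n, peeling unique[n-1]; ported as recursion on the REVERSED
-- prefix list (head = unique[n-1]), value for value the same computation.
-- tuple(dict.fromkeys(..)) is PySem.List.dedup.
def xorsB : List Int → Nat → List Int
  | _, 0 => [(0 : Int)]
  | [], _ + 1 => []
  | g :: rest, h + 1 =>
      PySem.List.dedup (xorsB rest (h + 1) ++ (xorsB rest h).map (fun x => PySem.Int.bxor x g))

def degree_sets_exact_py_alt (gens : List Int) (t : Int) : List (List Int) :=
  let unique := PySem.List.sorted (PySem.Set.ofList gens) (fun x => x) false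
  (PySem.List.pyRange 0 (t + 1) 1).map (fun h => PySem.Set.ofList (xorsB unique.reverse h.toNat))

-- ===== PRECONDITION & SPEC =====
-- Pre_ excludes t < 0, on which Python A raises IndexError (fault_sets[0] on an empty list).
def Pre_degree_sets_exact_py (_gens : List Int) (t : Int) : Prop := 0 ≤ t
instance (gens : List Int) (t : Int) : Decidable (Pre_degree_sets_exact_py gens t) := by
  unfold Pre_degree_sets_exact_py; infer_instance

def pvWitness_degree_sets_exact_py : List Int × Int := ([1, 2, 4, 8], 2)

def Spec_degree_sets_exact_py (gens : List Int) (t : Int) (out : List (List Int)) : Prop :=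
  out = degree_sets_exact_py_alt gens t
instance (gens : List Int) (t : Int) (out : List (List Int)) : Decidable (Spec_degree_sets_exact_py gens t out) := by
  unfold Spec_degree_sets_exact_py; infer_instance

-- ===== CLAIM (what is proved, stated in full; the proofs are below) =====
def Claim_equal_degree_sets_exact_py : Prop := ∀ (gens : List Int) (t : Int), Dom_degree_sets_exact_py gens t → Pre_degree_sets_exact_py gens t → Spec_degree_sets_exact_py gens t (degree_sets_exact_py gens t)


-- ===== LEMMAS AND PROOFS =====

-- folding 'add (f x)' visits each distinct value once: fold over set(l) = fold over l
theorem foldl_add_dedup {α β : Type} [DecidableEq α] [DecidableEq β] (f : β → α) (l : List β)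
    (s : PySem.Set α) :
    (PySem.Set.ofList l).foldl (fun c x => PySem.Set.add c (f x)) s
      = l.foldl (fun c x => PySem.Set.add c (f x)) s := by
  induction l using List.reverseRecOn generalizing s with
  | nil => rfl
  | append_singleton l x ih =>
    rw [PySem.Set.ofList_append_singleton]
    by_cases hx : x ∈ l
    · rw [PySem.Set.add_of_mem (by simpa [PySem.Set.mem_ofList] using hx)]
      rw [List.foldl_append, ih]
      have hm : f x ∈ l.foldl (fun c x => PySem.Set.add c (f x)) s := by
        rw [PySem.Set.mem_foldl_add]
        exact Or.inr ⟨x, hx, rfl⟩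
      simp [PySem.Set.add_of_mem hm]
    · rw [PySem.Set.add_of_not_mem (by simpa [PySem.Set.mem_ofList] using hx)]
      rw [List.foldl_append, List.foldl_append, ih]

-- A's one-cell update computes B's next-level set
theorem crux (r : List Int) (g : Int) (k : Nat) :
    (PySem.Set.ofList (xorsB r k)).foldl (fun c s => PySem.Set.add c (PySem.Int.bxor s g))
        (PySem.Set.ofList (xorsB r (k + 1)))
      = PySem.Set.ofList (xorsB (g :: r) (k + 1)) := by
  show _ = PySem.Set.ofList (PySem.List.dedup (xorsB r (k+1) ++ (xorsB r k).map (fun x => PySem.Int.bxor x g)))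
  rw [PySem.List.dedup_eq_ofList, PySem.Set.ofList_ofList]
  rw [PySem.Set.ofList_append, PySem.Set.update_map_eq_foldl_add]
  rw [foldl_add_dedup]

theorem xorsB_zero (r : List Int) : xorsB r 0 = [0] := by cases r <;> rfl

def tblX (r : List Int) (n : Nat) : List (List Int) :=
  (List.range n).map (fun h => PySem.Set.ofList (xorsB r h))

def mixT (r : List Int) (g : Int) (n k : Nat) : List (List Int) :=
  (List.range (n + 1)).map (fun h => PySem.Set.ofList (xorsB (if h ≤ k then r else g :: r) h))

def bodyA (g : Int) (fs : List (List Int)) (h : Int) : List (List Int) :=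
  PySem.List.pySetD fs h
    ((PySem.List.pyGetD fs (h - 1) ([] : List Int)).foldl
      (fun c s => PySem.Set.add c (PySem.Int.bxor s g))
      (PySem.List.pyGetD fs h ([] : List Int)))

theorem pyAInner_eq (t : Int) (fs : List (List Int)) (g : Int) :
    pyAInner t fs g = (PySem.List.pyRange t 0 (-1)).foldl (bodyA g) fs := rfl

theorem step_one (r : List Int) (g : Int) (n k : Nat) (hk : k + 1 ≤ n) :
    bodyA g (mixT r g n (k + 1)) ((k + 1 : Nat) : Int) = mixT r g n k := by
  have h1 : ((k + 1 : Nat) : Int) - 1 = ((k : Nat) : Int) := by push_cast; ring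
  unfold bodyA mixT
  rw [h1, PySem.List.pyGetD_natCast, PySem.List.pyGetD_natCast, PySem.List.pySetD_natCast]
  rw [PySem.List.getD_map_range _ _ _ _ (by omega), PySem.List.getD_map_range _ _ _ _ (by omega)]
  rw [if_pos (by omega), if_pos (by omega), crux]
  apply List.ext_getElem
  · simp
  · intro i hi1 hi2
    simp only [List.length_set, List.length_map, List.length_range] at hi1
    by_cases hik : i = k + 1
    · subst hik
      rw [List.getElem_set_self]
      simp only [List.getElem_map, List.getElem_range]
      rw [if_neg (show ¬ (k + 1 ≤ k) by omega)]
    · rw [List.getElem_set_ne (fun h => hik h.symm)]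
      simp only [List.getElem_map, List.getElem_range]
      by_cases hle : i ≤ k
      · rw [if_pos (show i ≤ k + 1 by omega), if_pos hle]
      · rw [if_neg (show ¬ i ≤ k + 1 by omega), if_neg hle]

theorem fold_desc (r : List Int) (g : Int) (n : Nat) :
    ∀ k, k ≤ n → (PySem.List.pyRange ((k : Nat) : Int) 0 (-1)).foldl (bodyA g) (mixT r g n k)
      = mixT r g n 0 := by
  intro k
  induction k with
  | zero => intro _; rw [PySem.List.pyRange_neg_one_eq_nil (by omega)]; rfl
  | succ k ih =>
    intro hk
    rw [PySem.List.pyRange_neg_one_cons (by positivity)]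
    have h1 : ((k + 1 : Nat) : Int) - 1 = ((k : Nat) : Int) := by push_cast; ring
    rw [List.foldl_cons, step_one r g n k hk, h1, ih (by omega)]

theorem mixT_top (r : List Int) (g : Int) (n : Nat) : mixT r g n n = tblX r (n + 1) := by
  unfold mixT tblX
  apply List.map_congr_left
  intro h hh
  rw [List.mem_range] at hh
  rw [if_pos (by omega)]

theorem mixT_bot (r : List Int) (g : Int) (n : Nat) : mixT r g n 0 = tblX (g :: r) (n + 1) := by
  unfold mixT tblX
  apply List.map_congr_left
  intro h hh
  rcases h with _ | h'
  · rw [if_pos le_rfl, xorsB_zero, xorsB_zero]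
  · rw [if_neg (by omega)]

theorem pyAInner_tbl (r : List Int) (g : Int) (n : Nat) :
    pyAInner ((n : Nat) : Int) (tblX r (n + 1)) g = tblX (g :: r) (n + 1) := by
  rw [pyAInner_eq, ← mixT_top r g n, fold_desc r g n n le_rfl, mixT_bot]

theorem foldl_tbl (n : Nat) (l : List Int) : ∀ r : List Int,
    l.foldl (pyAInner ((n : Nat) : Int)) (tblX r (n + 1)) = tblX (l.reverse ++ r) (n + 1) := by
  induction l with
  | nil => intro r; rfl
  | cons x l ih =>
    intro r
    rw [List.foldl_cons, pyAInner_tbl, ih (x :: r)]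
    congr 1
    simp

theorem init_tbl (n : Nat) :
    (PySem.List.pySetD ((PySem.List.pyRange 0 (((n : Nat) : Int) + 1) 1).map (fun _ => ([] : List Int))) 0
      (PySem.Set.add (PySem.List.pyGetD ((PySem.List.pyRange 0 (((n : Nat) : Int) + 1) 1).map (fun _ => ([] : List Int))) 0 []) (0 : Int)))
      = tblX [] (n + 1) := by
  have hcast : ((n : Nat) : Int) + 1 = ((n + 1 : Nat) : Int) := by push_cast; ring
  rw [hcast, PySem.List.pyRange_zero_natCast, List.map_map]
  have h0 : ((List.range (n+1)).map ((fun _ => ([] : List Int)) ∘ fun k => ((k : Nat) : Int))) = (List.range (n+1)).map (fun _ => ([] : List Int)) := rfl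
  rw [h0]
  have hg : PySem.List.pyGetD ((List.range (n+1)).map (fun _ => ([] : List Int))) 0 [] = [] := by
    have : (0 : Int) = ((0 : Nat) : Int) := rfl
    rw [this, PySem.List.pyGetD_natCast, PySem.List.getD_map_range _ _ _ _ (by omega)]
  rw [hg]
  have : (0 : Int) = ((0 : Nat) : Int) := rfl
  rw [this, PySem.List.pySetD_natCast]
  apply List.ext_getElem
  · simp [tblX]
  · intro i hi1 hi2
    simp only [List.length_set, List.length_map, List.length_range] at hi1
    rw [List.getElem_set]
    unfold tblX
    simp only [List.getElem_map, List.getElem_range]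
    by_cases hi : i = 0
    · subst hi; rw [if_pos rfl]; rfl
    · rw [if_neg (Ne.symm hi)]
      cases i with
      | zero => omega
      | succ j => rfl

theorem main_eq (gens : List Int) (t : Int) (ht : 0 ≤ t) :
    degree_sets_exact_py gens t = degree_sets_exact_py_alt gens t := by
  obtain ⟨n, rfl⟩ : ∃ n : Nat, t = ((n : Nat) : Int) := ⟨t.toNat, (Int.toNat_of_nonneg ht).symm⟩
  simp only [degree_sets_exact_py, degree_sets_exact_py_alt]
  rw [init_tbl n, foldl_tbl n]
  have hcast : ((n : Nat) : Int) + 1 = ((n + 1 : Nat) : Int) := by push_cast; ring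
  rw [hcast, PySem.List.pyRange_zero_natCast, List.map_map]
  unfold tblX
  simp only [List.append_nil, Function.comp_def, Int.toNat_natCast]

-- ===== VERDICT (by name: the statement is the Claim_ definition above) =====
theorem degree_sets_exact_py_spec : Claim_equal_degree_sets_exact_py := by
  intro gens t _ hpre
  unfold Spec_degree_sets_exact_py
  exact main_eq gens t hpre
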